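-- pv_equiv track=rewrite | github.com/datacenter/acitoolkit | applications/reports/Table.py | row_column
-- ===== SOURCE A (Python) =====
-- def row_column(data, table_title = None):
--     """
--     Will build a table using the data.  Data is
--     a list of table rows.
--     """
--
--     num_columns = len(data[0])
--     num_rows = len(data)
--
--     #fill out incomplete rows
--     for row in range(num_rows):
--         if len(data[row]) < num_columns:
--             for column in range(len(data[row]),num_columns):
--                 data[row].append('')
--
--     #get column widths
--     column_width = []
--     for column in range(num_columns):
--         column_width.append(len(data[0][column]))
--     for column in range(num_columns):
--         for row in range(num_rows):
--             if column_width[column] < len(data[row][column]):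
--                 column_width[column] = len(data[row][column])
--     # Get total width
--     total_width = 0
--     for column in range(num_columns):
--         total_width += column_width[column]
--     total_width += (num_columns-1)*3+2
--
--     #build format strings
--     format_title_line = '+{0:=^'+str(total_width)+'}+\n'
--     format_title      = '{0:^'+str(total_width)+'}\n'
--     format_line = '+'
--     format_div = '+'
--     format_row = '|'
--     for column in range(num_columns) :
--         format_line += '{'+str(column)+':-^'+str(column_width[column])+'}'
--         format_row += '{'+str(column)+':^'+str(column_width[column])+'}'
--         format_div += '{'+str(column)+':=^'+str(column_width[column])+'}'
--         if column < num_columns -1 :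
--             format_div += '=+='
--             format_row += ' | '
--             format_line+= '-+-'
--
--     # build blank data for divider
--     divider = []
--     for column in range(num_columns):
--         divider.append('')
--
--     #build table
--     text_string = ''
--     if table_title :
--         #text_string += format_title_line.format('')
--         text_string += format_title.format(table_title)
--
--     text_string += format_line.format(*divider)+'+\n'
--     text_string += format_row.format(*data[0])+'|\n'
--     text_string += format_div.format(*divider)+'+\n'
--     for row in range(1,num_rows):
--         text_string += format_row.format(*data[row])+'|\n'
--
--     text_string += format_line.format(*divider)+'+\n'
--     return text_string
-- ===== SOURCE B (Python) =====
-- def row_column(data, table_title=None):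
--     """Render list-of-rows as ASCII bordered table, built COLUMN-major: one
--     vertical strip of ready-made cells per column, then transposed into lines.
--     Pads incomplete rows in place like the original."""
--     num_columns = len(data[0])
--     for row in data:
--         row.extend([''] * (num_columns - len(row)))
--     num_rows = len(data)
--     # fill char of every output line, top to bottom
--     fills = ['-', ' ', '='] + [' '] * (num_rows - 1) + ['-']
--     # one strip per column: its cells for every line, already centered/filled
--     strips = []
--     for c in range(num_columns):
--         w = max(len(r[c]) for r in data)
--         column = ['', data[0][c], ''] + [r[c] for r in data[1:]] + ['']
--         strips.append([format(cell, f + '^%d' % w) for f, cell in zip(fills, column)])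
--     # transpose: line i joins the i-th cell of every strip
--     out = []
--     for i, f in enumerate(fills):
--         edge = '|' if f == ' ' else '+'
--         out.append(edge + (f + edge + f).join(s[i] for s in strips) + edge)
--     if table_title:
--         total_width = sum(len(s[0]) for s in strips) + (num_columns - 1) * 3 + 2
--         out.insert(0, format(table_title, '^%d' % total_width))
--     return '\n'.join(out) + '\n'
-- ===== Notes on version B (the rewrite author's own statement) =====
-- stated objective: alternative
-- what changed: B builds the table column-major — one vertical strip of ready-made (centered/filled) cells per column, widths from a per-column max — and then transposes, producing each output line by joining the i-th cell of every strip and joining the lines with newlines, instead of A's row-major pass that constructs '{i:-^w}'-style format-template strings and applies them row by row.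
-- outside the precondition, e.g. on row_column([], None): A raises IndexError, B raises IndexError; on row_column([[], ['x']], 't'): A raises ValueError, B raises ValueError
import Mathlib
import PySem

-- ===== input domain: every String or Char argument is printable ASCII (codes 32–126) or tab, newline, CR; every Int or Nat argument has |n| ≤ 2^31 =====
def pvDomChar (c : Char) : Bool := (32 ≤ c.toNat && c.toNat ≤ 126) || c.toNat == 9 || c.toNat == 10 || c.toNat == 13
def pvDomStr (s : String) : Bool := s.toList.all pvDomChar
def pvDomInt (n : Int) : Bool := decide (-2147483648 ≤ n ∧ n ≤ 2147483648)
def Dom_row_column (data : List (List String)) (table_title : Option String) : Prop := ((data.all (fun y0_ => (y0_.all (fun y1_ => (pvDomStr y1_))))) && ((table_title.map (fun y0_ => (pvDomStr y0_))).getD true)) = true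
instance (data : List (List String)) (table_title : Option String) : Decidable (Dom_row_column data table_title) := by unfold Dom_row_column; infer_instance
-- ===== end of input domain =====

-- B builds the table COLUMN-major (one vertical strip of ready cells per column, then a
-- transpose joins the i-th cell of every strip into line i) instead of A's row-major
-- format-template-string phase; equivalence is about the RETURN value only (the Python A
-- pads short rows of `data` in place; the Python B performs the same in-place padding).

-- Python's format(s, fill ++ '^' ++ w) centering (extra fill char goes to the right);
-- shared primitive of both ports, like Python's built-in format().
def pyCenterC (fill : Char) (w : Nat) (cs : List Char) : List Char :=
  if w ≤ cs.length then cs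
  else
    List.replicate ((w - cs.length) / 2) fill ++ cs ++
      List.replicate ((w - cs.length) - (w - cs.length) / 2) fill

-- ===== PORT A =====
-- A's format strings '{i:f^w}'-with-literals are modeled structurally: a format string is a
-- list of segments, a segment being either a literal or a placeholder (index, fill, width).
inductive FmtSeg
  | lit : List Char → FmtSeg
  | slot : Nat → Char → Nat → FmtSeg
deriving DecidableEq, Repr

def segVal (args : List (List Char)) : FmtSeg → List Char
  | .lit t => t
  | .slot i f w => pyCenterC f w (args.getD i [])

-- fmt.format(*args): substitute every placeholder (centered), concatenate.
def applyFmt (segs : List FmtSeg) (args : List (List Char)) : List Char :=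
  segs.foldl (fun acc s => acc ++ segVal args s) []

def row_column (data : List (List String)) (table_title : Option String) : String :=
  let d0 : List (List (List Char)) := data.map (fun r => r.map String.toList)
  let num_columns : Nat := (d0.getD 0 []).length   -- len(data[0]); data = [] raises → excluded by Pre_
  let num_rows : Nat := d0.length
  -- fill out incomplete rows
  let d : List (List (List Char)) :=
    (PySem.List.pyRange 0 (num_rows : Int) 1).foldl
      (fun dd r =>
        if (dd.getD r.toNat []).length < num_columns then
          dd.set r.toNat
            ((PySem.List.pyRange ((dd.getD r.toNat []).length : Int) (num_columns : Int) 1).foldl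
              (fun row _ => row ++ [[]]) (dd.getD r.toNat []))
        else dd) d0
  -- get column widths
  let column_width0 : List Nat :=
    (PySem.List.pyRange 0 (num_columns : Int) 1).foldl
      (fun ws c => ws ++ [((d.getD 0 []).getD c.toNat []).length]) []
  let column_width : List Nat :=
    (PySem.List.pyRange 0 (num_columns : Int) 1).foldl
      (fun ws c =>
        (PySem.List.pyRange 0 (num_rows : Int) 1).foldl
          (fun ws r =>
            if ws.getD c.toNat 0 < ((d.getD r.toNat []).getD c.toNat []).length then
              ws.set c.toNat ((d.getD r.toNat []).getD c.toNat []).length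
            else ws) ws) column_width0
  -- get total width
  let total_width0 : Int :=
    (PySem.List.pyRange 0 (num_columns : Int) 1).foldl
      (fun t c => t + (column_width.getD c.toNat 0 : Int)) 0
  let total_width : Int := total_width0 + ((num_columns : Int) - 1) * 3 + 2
  -- build format strings (one loop, three accumulators)
  let fmts : List FmtSeg × List FmtSeg × List FmtSeg :=
    (PySem.List.pyRange 0 (num_columns : Int) 1).foldl
      (fun f c =>
        (f.1 ++ [FmtSeg.slot c.toNat '-' (column_width.getD c.toNat 0)] ++
           (if c < (num_columns : Int) - 1 then [FmtSeg.lit "-+-".toList] else []),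
         f.2.1 ++ [FmtSeg.slot c.toNat ' ' (column_width.getD c.toNat 0)] ++
           (if c < (num_columns : Int) - 1 then [FmtSeg.lit " | ".toList] else []),
         f.2.2 ++ [FmtSeg.slot c.toNat '=' (column_width.getD c.toNat 0)] ++
           (if c < (num_columns : Int) - 1 then [FmtSeg.lit "=+=".toList] else [])))
      ([FmtSeg.lit ['+']], [FmtSeg.lit ['|']], [FmtSeg.lit ['+']])
  -- build blank data for divider
  let divider : List (List Char) :=
    (PySem.List.pyRange 0 (num_columns : Int) 1).foldl (fun l _ => l ++ [[]]) []
  -- build table.  'if table_title:' — None and '' are falsy.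
  let titleTruthy : Bool := match table_title with | some t => !t.toList.isEmpty | none => false
  -- (with a truthy title and total_width < 0 Python raises ValueError → excluded by Pre_,
  --  so .toNat below is only reached with 0 ≤ total_width)
  let text : List Char :=
    if titleTruthy then pyCenterC ' ' total_width.toNat (table_title.getD "").toList ++ ['\n']
    else []
  let text := text ++ applyFmt fmts.1 divider ++ ['+', '\n']
  let text := text ++ applyFmt fmts.2.1 (d.getD 0 []) ++ ['|', '\n']
  let text := text ++ applyFmt fmts.2.2 divider ++ ['+', '\n']
  let text :=
    (PySem.List.pyRange 1 (num_rows : Int) 1).foldl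
      (fun acc r => acc ++ applyFmt fmts.2.1 (d.getD r.toNat []) ++ ['|', '\n']) text
  let text := text ++ applyFmt fmts.1 divider ++ ['+', '\n']
  String.ofList text

-- ===== PORT B =====
-- Column-major: one strip of ready (centered/filled) cells per column, for every output
-- line top to bottom; line i of the table joins the i-th cell of every strip.
def row_column_alt (data : List (List String)) (table_title : Option String) : String :=
  let d0 : List (List (List Char)) := data.map (fun r => r.map String.toList)
  let nc : Nat := (d0.headD []).length
  let d : List (List (List Char)) := d0.map (fun r => r ++ List.replicate (nc - r.length) [])
  let nr : Nat := d.length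
  -- fill char of every output line, top to bottom
  let fills : List Char := ['-', ' ', '='] ++ List.replicate (nr - 1) ' ' ++ ['-']
  let strips : List (List (List Char)) :=
    (List.range nc).map (fun c =>
      let w : Nat := (d.map (fun r => (r.getD c []).length)).foldl max 0
      let column : List (List Char) :=
        [[], (d.getD 0 []).getD c [], []] ++ (d.drop 1).map (fun r => r.getD c []) ++ [[]]
      (fills.zip column).map (fun p => pyCenterC p.1 w p.2))
  -- transpose: line i joins the i-th cell of every strip
  let lines : List (List Char) :=
    (PySem.List.enumerate fills 0).map (fun p =>
      let edge : Char := if p.2 == ' ' then '|' else '+'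
      [edge] ++
        PySem.Chars.join [p.2, edge, p.2] (strips.map (fun s => s.getD p.1.toNat [])) ++
        [edge])
  let out : List (List Char) :=
    match table_title with
    | some t =>
        if t.toList.isEmpty then lines
        else
          pyCenterC ' '
              ((strips.map (fun s => (s.getD 0 []).length)).sum + (nc - 1) * 3 + 2)
              t.toList :: lines
    | none => lines
  String.ofList (PySem.Chars.join ['\n'] out ++ ['\n'])

-- ===== PRECONDITION & SPEC =====
-- Pre_ excludes exactly the inputs where the Python A raises: data = [] (IndexError on data[0]),
-- and an empty first row together with a truthy title (ValueError: negative format width).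
def Pre_row_column (data : List (List String)) (table_title : Option String) : Prop :=
  data ≠ [] ∧ ((data.headD []) ≠ [] ∨ (table_title.getD "") = "")
instance (data : List (List String)) (table_title : Option String) : Decidable (Pre_row_column data table_title) := by unfold Pre_row_column; infer_instance

def pvWitness_row_column : List (List String) × Option String := ([["ab", "c"], ["d"]], some "T")

def Spec_row_column (data : List (List String)) (table_title : Option String) (out : String) : Prop := out = row_column_alt data table_title
instance (data : List (List String)) (table_title : Option String) (out : String) : Decidable (Spec_row_column data table_title out) := by unfold Spec_row_column; infer_instance

-- ===== CLAIM (what is proved, stated in full; the proofs are below) =====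
def Claim_equal_row_column : Prop := ∀ (data : List (List String)) (table_title : Option String), Dom_row_column data table_title → Pre_row_column data table_title → Spec_row_column data table_title (row_column data table_title)

-- ===== LEMMAS AND PROOFS =====

-- proof-only helpers: the common normal form both ports are reduced to
def padRow (nc : Nat) (r : List (List Char)) : List (List Char) :=
  r ++ List.replicate (nc - r.length) []

def ncOf (data : List (List String)) : Nat :=
  ((data.map (fun r => r.map String.toList)).headD []).length

def dOf (data : List (List String)) : List (List (List Char)) :=
  (data.map (fun r => r.map String.toList)).map (padRow (ncOf data))

def Wof (d : List (List (List Char))) (c : Nat) : Nat :=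
  (d.map (fun r => (r.getD c []).length)).foldl max 0

def rowLine (d : List (List (List Char))) (nc : Nat) (fill edge : Char) (sep : List Char)
    (cells : Nat → List Char) : List Char :=
  [edge] ++ PySem.Chars.join sep ((List.range nc).map (fun c => pyCenterC fill (Wof d c) (cells c)))
    ++ [edge]

def normTable (d : List (List (List Char))) (nc : Nat) (tt : Option String) : List Char :=
  let H := rowLine d nc '-' '+' "-+-".toList (fun _ => []) ++ ['\n']
  let Dv := rowLine d nc '=' '+' "=+=".toList (fun _ => []) ++ ['\n']
  let Row := fun (r : List (List Char)) =>
    rowLine d nc ' ' '|' " | ".toList (fun c => r.getD c []) ++ ['\n']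
  let title : List Char :=
    match tt with
    | some t =>
        if t.toList.isEmpty then []
        else pyCenterC ' ' (((List.range nc).map (Wof d)).sum + (nc - 1) * 3 + 2) t.toList
          ++ ['\n']
    | none => []
  title ++ H ++ Row (d.getD 0 []) ++ Dv ++ ((d.drop 1).map Row).flatten ++ H

-- fold over range(n) of Int, reindexed over Nat
theorem foldl_pyRange_cast {α : Type} (n : Nat) (f : α → Int → α) (init : α) :
    (PySem.List.pyRange 0 (n : Int) 1).foldl f init
      = (List.range n).foldl (fun a (k : Nat) => f a (k : Int)) init := by
  rw [PySem.List.pyRange_one, List.foldl_map]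
  simp only [sub_zero, Int.toNat_natCast, zero_add]

-- A's inner padding loop appends exactly the missing blanks
theorem pad_inner (row : List (List Char)) (nc : Nat) :
    (PySem.List.pyRange (row.length : Int) (nc : Int) 1).foldl
        (fun r _ => r ++ [([] : List Char)]) row
      = row ++ List.replicate (nc - row.length) [] := by
  have h := PySem.List.foldl_append_singleton_eq_map
      (f := fun _ : Int => ([] : List Char))
      (l := PySem.List.pyRange (row.length : Int) (nc : Int) 1) (acc := row)
  simp only [h]
  congr 1
  rw [List.map_const', PySem.List.length_pyRange_one]
  congr 1
  omega

-- A's outer padding loop over row indices is a map of padRow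
theorem pad_fold (nc : Nat) :
    ∀ (m j : Nat) (dd : List (List (List Char))), j + m = dd.length →
    (List.range' j m).foldl
        (fun dd (k : Nat) =>
          if (dd.getD k []).length < nc then
            dd.set k ((dd.getD k []) ++ List.replicate (nc - (dd.getD k []).length) [])
          else dd) dd
      = dd.take j ++ (dd.drop j).map (padRow nc) := by
  intro m
  induction m with
  | zero =>
    intro j dd h
    rw [List.range'_zero, List.foldl_nil, List.drop_eq_nil_of_le (by omega),
      List.take_of_length_le (by omega), List.map_nil, List.append_nil]
  | succ m ih =>
    intro j dd h
    rw [List.range'_succ, List.foldl_cons]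
    have hj : j < dd.length := by omega
    have hget : dd.getD j [] = dd[j] := List.getD_eq_getElem dd [] hj
    have hdrop : dd.drop j = dd[j] :: dd.drop (j+1) := List.drop_eq_getElem_cons hj
    have htk : dd.take (j+1) = dd.take j ++ [dd[j]] := by
      rw [List.take_add_one, List.getElem?_eq_getElem hj]; rfl
    by_cases hc : (dd.getD j []).length < nc
    · rw [if_pos hc]
      set v := dd.getD j [] ++ List.replicate (nc - (dd.getD j []).length) [] with hv
      have hset : dd.set j v = (dd.take j ++ [v]) ++ dd.drop (j+1) := by
        rw [List.set_eq_take_append_cons_drop, if_pos hj, List.append_assoc]; rfl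
      rw [ih (j+1) (dd.set j v) (by rw [List.length_set]; omega), hset,
        List.take_left' (by rw [List.length_append, List.length_take]; simp; omega),
        List.drop_left' (by rw [List.length_append, List.length_take]; simp; omega)]
      rw [hdrop, List.map_cons]
      have hpv : v = padRow nc dd[j] := by rw [hv, hget]; rfl
      rw [hpv, List.append_assoc]
      rfl
    · rw [if_neg hc]
      rw [ih (j+1) dd (by omega), hdrop, List.map_cons, htk]
      have hpv : padRow nc dd[j] = dd[j] := by
        unfold padRow
        rw [hget] at hc
        have h0 : nc - dd[j].length = 0 := by omega
        rw [h0, List.replicate_zero, List.append_nil]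
      rw [hpv, List.append_assoc]
      rfl

-- the row loop of A's width pass, one fixed column
theorem width_inner {α : Type} (c : Nat) (L : α → Nat) :
    ∀ (rows : List α) (ws : List Nat), c < ws.length →
    rows.foldl (fun ws r => if ws.getD c 0 < L r then ws.set c (L r) else ws) ws
      = ws.set c (rows.foldl (fun w r => max w (L r)) (ws.getD c 0)) := by
  intro rows
  induction rows with
  | nil =>
    intro ws hc
    rw [List.foldl_nil, List.foldl_nil, List.getD_eq_getElem ws 0 hc, List.set_getElem_self]
  | cons r rows ih =>
    intro ws hc
    rw [List.foldl_cons, List.foldl_cons]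
    by_cases h : ws.getD c 0 < L r
    · rw [if_pos h, ih _ (by rw [List.length_set]; exact hc)]
      rw [List.set_set, List.getD_eq_getElem _ 0 (by rw [List.length_set]; exact hc),
        List.getElem_set_self, Nat.max_eq_right (Nat.le_of_lt h)]
    · rw [if_neg h, ih _ hc, Nat.max_eq_left (Nat.le_of_not_lt h)]

-- the column loop of A's width pass: independent per-index updates are a map
theorem width_outer (F : Nat → Nat → Nat) (s : List Nat → Nat → List Nat)
    (hs : ∀ ws c, c < ws.length → s ws c = ws.set c (F c (ws.getD c 0))) (ws : List Nat) :
    ∀ m, m ≤ ws.length →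
    (List.range m).foldl s ws
      = (List.range ws.length).map
          (fun c => if c < m then F c (ws.getD c 0) else ws.getD c 0) := by
  intro m
  induction m with
  | zero =>
    intro _
    rw [List.range_zero, List.foldl_nil]
    apply List.ext_getElem (by simp)
    intro i h1 h2
    simp only [List.getElem_map, List.getElem_range]
    rw [if_neg (Nat.not_lt_zero i), List.getD_eq_getElem _ 0 h1]
  | succ m ih =>
    intro hm
    rw [List.range_succ, List.foldl_append, List.foldl_cons, List.foldl_nil,
      ih (by omega)]
    rw [hs _ m (by simp; omega)]
    apply List.ext_getElem (by simp)
    intro i h1 h2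
    simp only [List.getElem_set, List.getElem_map, List.getElem_range]
    rw [List.getD_eq_getElem _ 0 (by simp; omega), List.getElem_map, List.getElem_range]
    by_cases he : m = i
    · subst he; simp
    · rw [if_neg he]
      by_cases h3 : i < m
      · rw [if_pos h3, if_pos (by omega)]
      · rw [if_neg h3, if_neg (by omega : ¬ i < m + 1)]

theorem foldl_max_self_eq_zero (x : Nat) (t : List Nat) :
    (x :: t).foldl max x = (x :: t).foldl max 0 := by
  rw [List.foldl_cons, List.foldl_cons, Nat.max_self, Nat.zero_max]

theorem join_append_singleton (sep : List Char) :
    ∀ (l : List (List Char)) (x : List Char),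
    PySem.Chars.join sep (l ++ [x]) = (l.map (· ++ sep)).flatten ++ x := by
  intro l
  induction l with
  | nil => intro x; simp [PySem.Chars.join_singleton]
  | cons a t ih =>
    intro x
    rw [List.cons_append]
    rcases t with _ | ⟨b, t'⟩
    · rw [List.nil_append, PySem.Chars.join_cons_cons, PySem.Chars.join_singleton]
      simp
    · rw [List.cons_append, PySem.Chars.join_cons_cons, ← List.cons_append, ih x]
      simp

-- 'cell, separator after every column but the last' is a join
theorem interleave_join (sep : List Char) (F : Nat → List Char) (n : Nat) :
    ((List.range n).map (fun c => F c ++ if c < n - 1 then sep else [])).flatten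
      = PySem.Chars.join sep ((List.range n).map F) := by
  cases n with
  | zero => simp [PySem.Chars.join_nil]
  | succ n =>
    rw [List.range_succ]
    simp only [List.map_append, List.map_cons, List.map_nil]
    rw [join_append_singleton, List.flatten_append]
    congr 1
    · congr 1
      rw [List.map_map]
      apply List.map_congr_left
      intro c hc
      simp only [Function.comp_apply]
      rw [if_pos (by simp at hc; omega)]
    · rw [if_neg (by omega)]
      simp

theorem zip_map_eq_range_map {α β : Type} (G : α → Nat → β) (cells : List α) (ws : List Nat)
    (dflt : α) (h : ws.length ≤ cells.length) :
    (cells.zip ws).map (fun p => G p.1 p.2)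
      = (List.range ws.length).map (fun c => G (cells.getD c dflt) (ws.getD c 0)) := by
  apply List.ext_getElem (by simp; omega)
  intro i h1 h2
  simp only [List.getElem_map, List.getElem_zip, List.getElem_range]
  have hi : i < ws.length := by simp at h1; omega
  rw [List.getD_eq_getElem _ dflt (by omega), List.getD_eq_getElem _ 0 hi]

theorem map_range_getD_drop {α : Type} (d : List α) (dflt : α) (j m : Nat)
    (h : j + m = d.length) :
    (List.range m).map (fun k => d.getD (j + k) dflt) = d.drop j := by
  apply List.ext_getElem (by simp; omega)
  intro i h1 h2
  have hi : i < m := by simpa using h1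
  simp only [List.getElem_map, List.getElem_range, List.getElem_drop]
  rw [List.getD_eq_getElem _ dflt (by omega)]

theorem map_range_getD {α β : Type} (l : List α) (dflt : α) (G : α → β) :
    (List.range l.length).map (fun j => G (l.getD j dflt)) = l.map G := by
  apply List.ext_getElem (by simp)
  intro i h1 h2
  simp only [List.getElem_map, List.getElem_range]
  rw [List.getD_eq_getElem _ dflt (by simpa using h2)]

theorem sum_map_getD_int (ws : List Nat) :
    ((List.range ws.length).map (fun c => (ws.getD c 0 : Int))).sum = (ws.sum : Int) := by
  have h : (List.range ws.length).map (fun c => (ws.getD c 0 : Int))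
      = ws.map (fun x : Nat => (x : Int)) := by
    apply List.ext_getElem (by simp)
    intro i h1 h2
    simp only [List.getElem_map, List.getElem_range]
    rw [List.getD_eq_getElem _ 0 (by simpa using h2)]
  rw [h, ← Nat.cast_list_sum]

-- a loop with three independent accumulators is three loops
theorem foldl_prod3 {α β γ δ : Type} (f : α → δ → α) (g : β → δ → β) (h : γ → δ → γ)
    (l : List δ) : ∀ (a : α) (b : β) (c : γ),
    l.foldl (fun s e => (f s.1 e, g s.2.1 e, h s.2.2 e)) (a, b, c)
      = (l.foldl f a, l.foldl g b, l.foldl h c) := by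
  induction l with
  | nil => intro a b c; rfl
  | cons x t ih => intro a b c; simpa using ih (f a x) (g b x) (h c x)

-- one of A's format-string accumulators, folded out to its segment list
theorem fmt_build (fill : Char) (sep : List Char) (e : Char) (ws : List Nat) (n : Nat) :
    (List.range n).foldl
        (fun l (k : Nat) =>
          l ++ [FmtSeg.slot k fill (ws.getD k 0)] ++
            (if (k : Int) < (n : Int) - 1 then [FmtSeg.lit sep] else [])) [FmtSeg.lit [e]]
      = [FmtSeg.lit [e]] ++
          ((List.range n).map
            (fun c => [FmtSeg.slot c fill (ws.getD c 0)] ++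
              if c < n - 1 then [FmtSeg.lit sep] else [])).flatten := by
  have hcong := PySem.List.foldl_congr_mem
    (l := List.range n) (init := ([FmtSeg.lit [e]] : List FmtSeg))
    (f := fun l (k : Nat) =>
      l ++ [FmtSeg.slot k fill (ws.getD k 0)] ++
        (if (k : Int) < (n : Int) - 1 then [FmtSeg.lit sep] else []))
    (g := fun l (k : Nat) =>
      l ++ ([FmtSeg.slot k fill (ws.getD k 0)] ++
        (if k < n - 1 then [FmtSeg.lit sep] else [])))
    (by
      intro acc k hk
      have hk' : k < n := List.mem_range.mp hk
      dsimp only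
      rw [List.append_assoc]
      congr 2
      by_cases h1 : k < n - 1
      · rw [if_pos (by omega : (k : Int) < (n : Int) - 1), if_pos h1]
      · rw [if_neg (by omega : ¬ (k : Int) < (n : Int) - 1), if_neg h1])
  rw [hcong, PySem.List.foldl_append_eq_flatMap, List.flatMap_def]

theorem line_eq (fill e : Char) (sep : List Char) (ws : List Nat) (n : Nat)
    (args : List (List Char)) (hlen : ws.length = n) (h : n ≤ args.length) :
    applyFmt ([FmtSeg.lit [e]] ++
        ((List.range n).map
          (fun c => [FmtSeg.slot c fill (ws.getD c 0)] ++
            if c < n - 1 then [FmtSeg.lit sep] else [])).flatten) args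
      = [e] ++ PySem.Chars.join sep ((args.zip ws).map (fun p => pyCenterC fill p.2 p.1)) := by
  subst hlen
  unfold applyFmt
  rw [PySem.List.foldl_append_eq_flatMap, List.nil_append, List.flatMap_append]
  have h0 : ([FmtSeg.lit [e]] : List FmtSeg).flatMap (segVal args) = [e] := by
    simp [segVal]
  rw [h0]
  congr 1
  rw [← List.flatMap_def, List.flatMap_assoc]
  have h1 : ∀ c ∈ List.range ws.length,
      (([FmtSeg.slot c fill (ws.getD c 0)] ++
          if c < ws.length - 1 then [FmtSeg.lit sep] else []).flatMap (segVal args))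
        = pyCenterC fill (ws.getD c 0) (args.getD c []) ++
            if c < ws.length - 1 then sep else [] := by
    intro c _
    by_cases hc : c < ws.length - 1
    · rw [if_pos hc, if_pos hc]; simp [segVal]
    · rw [if_neg hc, if_neg hc]; simp [segVal]
  rw [List.flatMap_congr h1]
  rw [List.flatMap_def, interleave_join]
  rw [zip_map_eq_range_map (G := fun cell w => pyCenterC fill w cell) args ws [] h]

-- per-column value of A's width pass = the single max-fold Wof
theorem width_col (D : List (List (List Char))) (hD : D ≠ []) (c : Nat) (w0 : Nat)
    (hw0 : w0 = ((D.getD 0 []).getD c []).length) :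
    (List.range D.length).foldl (fun w (r : Nat) => max w (((D.getD r []).getD c []).length)) w0
      = Wof D c := by
  unfold Wof
  rw [← List.foldl_map (f := fun (r : Nat) => ((D.getD r []).getD c []).length) (g := max)]
  have h1 : (List.range D.length).map (fun (r : Nat) => ((D.getD r []).getD c []).length)
      = D.map (fun r => (r.getD c []).length) := by
    have h2 := map_range_getD_drop D [] 0 D.length (by omega)
    simp only [Nat.zero_add, List.drop_zero] at h2
    conv_rhs => rw [← h2]
    rw [List.map_map]
    rfl
  rw [h1]
  rcases D with _ | ⟨row, tl⟩
  · exact absurd rfl hD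
  · rw [List.map_cons]
    have hw0' : w0 = (row.getD c []).length := hw0
    rw [hw0', foldl_max_self_eq_zero]

-- A's 'remaining rows' loop, folded out to a flattened map over the row list's tail
theorem body_fold {α : Type} (G : α → List Char) (d : List α) (dflt : α) (T : List Char)
    (hd : 1 ≤ d.length) :
    (PySem.List.pyRange 1 (d.length : Int) 1).foldl (fun acc r => acc ++ G (d.getD r.toNat dflt)) T
      = T ++ ((d.drop 1).map G).flatten := by
  rw [PySem.List.pyRange_one, List.foldl_map]
  have hcong := PySem.List.foldl_congr_mem
    (l := List.range ((d.length : Int) - 1).toNat) (init := T)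
    (f := fun acc (k : Nat) => acc ++ G (d.getD ((1 : Int) + (k : Int)).toNat dflt))
    (g := fun acc (k : Nat) => acc ++ G (d.getD (1 + k) dflt))
    (by
      intro acc k hk
      dsimp only
      have : ((1 : Int) + (k : Int)).toNat = 1 + k := by omega
      rw [this])
  rw [hcong, PySem.List.foldl_append_eq_flatMap, List.flatMap_def]
  have h1 : ((d.length : Int) - 1).toNat = d.length - 1 := by omega
  rw [h1]
  have h2 := map_range_getD_drop d dflt 1 (d.length - 1) (by omega)
  conv_rhs => rw [← h2]
  rw [List.map_map]
  rfl

theorem body_fold' {α : Type} (F : α → List Char) (tail : List Char) (d : List α)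
    (dflt : α) (T : List Char) (hd : 1 ≤ d.length) :
    (PySem.List.pyRange 1 (d.length : Int) 1).foldl
        (fun acc r => acc ++ F (d.getD r.toNat dflt) ++ tail) T
      = T ++ ((d.drop 1).map (fun x => F x ++ tail)).flatten := by
  have hcong := PySem.List.foldl_congr_mem
    (l := PySem.List.pyRange 1 (d.length : Int) 1) (init := T)
    (f := fun acc r => acc ++ F (d.getD r.toNat dflt) ++ tail)
    (g := fun acc r => acc ++ (F (d.getD r.toNat dflt) ++ tail))
    (by intro acc x hx; dsimp only; rw [List.append_assoc])
  rw [hcong, body_fold (G := fun x => F x ++ tail) d dflt T hd]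

-- A reduced to the normal form
set_option maxHeartbeats 4000000 in
theorem A_eq_norm (data : List (List String)) (table_title : Option String)
    (hpre : Pre_row_column data table_title) :
    row_column data table_title
      = String.ofList (normTable (dOf data) (ncOf data) table_title) := by
  obtain ⟨hne, hcorner⟩ := hpre
  unfold row_column
  set d0 : List (List (List Char)) := data.map (fun r => r.map String.toList) with hd0
  have hd0ne : d0 ≠ [] := by
    rw [hd0]; simpa using hne
  have hh : List.headD d0 [] = d0.getD 0 [] := by cases d0 <;> rfl
  dsimp only
  set n : Nat := (d0.getD 0 []).length with hn
  have hnc : ncOf data = n := by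
    unfold ncOf
    rw [← hd0, hh]
  simp only [foldl_pyRange_cast, Int.toNat_natCast]
  -- 1. the padding loop is a map of padRow
  have hpad :
      (List.range d0.length).foldl
          (fun dd (k : Nat) =>
            if (dd.getD k []).length < n then
              dd.set k
                (List.foldl (fun row _ => row ++ [[]]) (dd.getD k [])
                  (PySem.List.pyRange ((dd.getD k []).length : Int) (n : Int) 1))
            else dd) d0
        = d0.map (padRow n) := by
    have hcong := PySem.List.foldl_congr_mem
      (l := List.range d0.length) (init := d0)
      (f := fun dd (k : Nat) =>
        if (dd.getD k []).length < n then
          dd.set k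
            (List.foldl (fun row _ => row ++ [[]]) (dd.getD k [])
              (PySem.List.pyRange ((dd.getD k []).length : Int) (n : Int) 1))
        else dd)
      (g := fun dd (k : Nat) =>
        if (dd.getD k []).length < n then
          dd.set k ((dd.getD k []) ++ List.replicate (n - (dd.getD k []).length) [])
        else dd)
      (by
        intro acc k hk
        dsimp only
        rw [pad_inner])
    rw [hcong, List.range_eq_range', pad_fold n d0.length 0 d0 (by omega)]
    simp
  rw [hpad]
  set D := List.map (padRow n) d0 with hD
  have hdOf : dOf data = D := by
    unfold dOf
    rw [← hd0, hnc, hD]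
  have hDlen : D.length = d0.length := by rw [hD, List.length_map]
  have hDne : D ≠ [] := by
    rw [hD]; simpa using hd0ne
  have hd0len1 : 1 ≤ d0.length := by
    rw [hd0, List.length_map]
    exact List.length_pos_of_ne_nil hne
  have hrowlen : ∀ row ∈ D, n ≤ row.length := by
    intro row hrow
    rw [hD] at hrow
    obtain ⟨r, _, hr⟩ := List.mem_map.mp hrow
    rw [← hr]
    simp [padRow]
    omega
  have hD0 : D.getD 0 [] = padRow n (d0.getD 0 []) := by
    rcases d0 with _ | ⟨a, l⟩
    · exact absurd rfl hd0ne
    · rfl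
  have hD0len : n ≤ (D.getD 0 []).length := by
    rw [hD0]
    simp [padRow]
    omega
  -- 2. first width pass
  have hcw0 : (List.range n).foldl
        (fun ws (k : Nat) => ws ++ [((D.getD 0 []).getD k []).length]) ([] : List Nat)
      = (List.range n).map (fun k => ((D.getD 0 []).getD k []).length) := by
    rw [PySem.List.foldl_append_singleton_eq_map, List.nil_append]
  rw [hcw0]
  -- 3. second width pass
  have hW : (List.range n).foldl
        (fun ws (c : Nat) =>
          (List.range d0.length).foldl
            (fun ws (r : Nat) =>
              if ws.getD c 0 < ((D.getD r []).getD c []).length then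
                ws.set c ((D.getD r []).getD c []).length
              else ws) ws)
        ((List.range n).map (fun k => ((D.getD 0 []).getD k []).length))
      = (List.range n).map (Wof D) := by
    have hblen : ((List.range n).map (fun k => ((D.getD 0 []).getD k []).length)).length = n := by
      simp
    rw [width_outer
      (F := fun c w0 => (List.range d0.length).foldl
        (fun w (r : Nat) => max w (((D.getD r []).getD c []).length)) w0)
      (s := fun ws (c : Nat) =>
        (List.range d0.length).foldl
          (fun ws (r : Nat) =>
            if ws.getD c 0 < ((D.getD r []).getD c []).length then
              ws.set c ((D.getD r []).getD c []).length
            else ws) ws)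
      (by
        intro ws c hc
        exact width_inner c (fun (r : Nat) => ((D.getD r []).getD c []).length)
          (List.range d0.length) ws hc)
      _ n (le_of_eq hblen.symm)]
    rw [hblen]
    apply List.map_congr_left
    intro c hc
    have hcn : c < n := List.mem_range.mp hc
    rw [if_pos hcn, PySem.List.getD_map_range _ n c 0 hcn, ← hDlen]
    exact width_col D hDne c _ rfl
  rw [hW]
  set W := (List.range n).map (Wof D) with hWdef
  have hWlen : W.length = n := by rw [hWdef, List.length_map, List.length_range]
  have hzipW : ∀ (fill : Char) (cells : List (List Char)), n ≤ cells.length →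
      (cells.zip W).map (fun p => pyCenterC fill p.2 p.1)
        = (List.range n).map (fun c => pyCenterC fill (Wof D c) (cells.getD c [])) := by
    intro fill cells hc
    rw [zip_map_eq_range_map (G := fun cell w => pyCenterC fill w cell) cells W []
      (by rw [hWlen]; exact hc), hWlen]
    apply List.map_congr_left
    intro c hcn
    rw [hWdef, PySem.List.getD_map_range _ n c 0 (List.mem_range.mp hcn)]
  have hrepl : ∀ c : Nat, (List.replicate n ([] : List Char)).getD c [] = [] := by
    intro c
    rcases Nat.lt_or_ge c n with h | h
    · rw [List.getD_eq_getElem _ _ (by simpa using h), List.getElem_replicate]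
    · rw [List.getD_eq_default _ _ (by simpa using h)]
  -- 4. divider
  have hdiv : (List.range n).foldl (fun l (_ : Nat) => l ++ [([] : List Char)]) [] =
      List.replicate n [] := by
    rw [PySem.List.foldl_append_singleton_eq_map, List.nil_append, List.map_const',
      List.length_range]
  rw [hdiv]
  -- 5. the format-string loop: three independent accumulators, each a flatMap
  rw [foldl_prod3
    (f := fun l (k : Nat) => l ++ [FmtSeg.slot k '-' (W.getD k 0)] ++
      (if (k : Int) < (n : Int) - 1 then [FmtSeg.lit "-+-".toList] else []))
    (g := fun l (k : Nat) => l ++ [FmtSeg.slot k ' ' (W.getD k 0)] ++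
      (if (k : Int) < (n : Int) - 1 then [FmtSeg.lit " | ".toList] else []))
    (h := fun l (k : Nat) => l ++ [FmtSeg.slot k '=' (W.getD k 0)] ++
      (if (k : Int) < (n : Int) - 1 then [FmtSeg.lit "=+=".toList] else []))
    (List.range n) [FmtSeg.lit ['+']] [FmtSeg.lit ['|']] [FmtSeg.lit ['+']]]
  dsimp only
  rw [fmt_build '-' "-+-".toList '+' W n, fmt_build ' ' " | ".toList '|' W n,
    fmt_build '=' "=+=".toList '+' W n]
  -- 6. each rendered line
  rw [line_eq '-' '+' "-+-".toList W n (List.replicate n []) hWlen (by simp),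
    line_eq '=' '+' "=+=".toList W n (List.replicate n []) hWlen (by simp),
    line_eq ' ' '|' " | ".toList W n (D.getD 0 []) hWlen hD0len]
  -- 7. the remaining-rows loop
  rw [show ((d0.length : Int)) = ((D.length : Int)) by rw [hDlen]]
  rw [body_fold' (tail := ['|', '\n']) (d := D) (dflt := []) (hd := by rw [hDlen]; exact hd0len1)]
  have hrow : ∀ row ∈ D.drop 1,
      applyFmt ([FmtSeg.lit ['|']] ++
          (List.map
            (fun c => [FmtSeg.slot c ' ' (W.getD c 0)] ++
              if c < n - 1 then [FmtSeg.lit " | ".toList] else [])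
            (List.range n)).flatten) row ++ ['|', '\n']
        = (rowLine D n ' ' '|' " | ".toList (fun c => row.getD c [])) ++ ['\n'] := by
    intro row hr
    rw [line_eq ' ' '|' " | ".toList W n row hWlen (hrowlen row (List.mem_of_mem_drop hr))]
    rw [hzipW ' ' row (hrowlen row (List.mem_of_mem_drop hr))]
    unfold rowLine
    simp [List.append_assoc]
  rw [List.map_congr_left hrow]
  -- 8. rewrite the three header/divider lines into rowLine form
  rw [hzipW '-' (List.replicate n []) (by simp), hzipW '=' (List.replicate n []) (by simp),
    hzipW ' ' (D.getD 0 []) hD0len]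
  have hreplmap : ∀ fill : Char,
      (List.range n).map (fun c => pyCenterC fill (Wof D c) ((List.replicate n ([] : List Char)).getD c []))
        = (List.range n).map (fun c => pyCenterC fill (Wof D c) []) := by
    intro fill
    apply List.map_congr_left
    intro c _
    rw [hrepl c]
  rw [hreplmap '-', hreplmap '=']
  -- 9. total width and the title
  have hsum : List.foldl (fun a (k : Nat) => a + ((W.getD k 0 : Nat) : Int)) 0 (List.range n)
      = (W.sum : Int) := by
    rw [PySem.List.foldl_add (List.range n) (fun k : Nat => ((W.getD k 0 : Nat) : Int)) 0,
      zero_add, ← hWlen, sum_map_getD_int]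
  rw [hsum]
  -- 10. assemble against normTable
  rw [hdOf, hnc]
  refine congrArg String.ofList ?_
  simp only [normTable, rowLine, hWdef]
  rcases table_title with _ | t
  · dsimp only
    simp only [Bool.false_eq_true, if_false, List.nil_append, List.append_assoc, List.cons_append]
  · dsimp only
    by_cases ht : t.toList.isEmpty
    · simp only [ht, Bool.not_true, Bool.false_eq_true, if_false, if_true, List.nil_append,
        List.append_assoc, List.cons_append]
    · have ht' : t.toList.isEmpty = false := by simpa using ht
      simp only [ht', Bool.not_false, if_true, Bool.false_eq_true, if_false]
      have hhead : data.headD [] ≠ [] := by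
        rcases hcorner with h | h
        · exact h
        · exfalso
          apply ht
          have : t = "" := h
          rw [this]
          rfl
      have hn1 : 1 ≤ n := by
        rcases data with _ | ⟨a, l⟩
        · exact absurd rfl hne
        · have h0 : d0.getD 0 [] = a.map String.toList := by rw [hd0]; rfl
          rw [hn, h0, List.length_map]
          exact List.length_pos_of_ne_nil (by simpa using hhead)
      have htw : ((W.sum : Int) + ((n : Int) - 1) * 3 + 2).toNat = W.sum + (n - 1) * 3 + 2 := by
        omega
      rw [htw, hWdef]
      simp only [List.append_assoc, List.cons_append, List.nil_append, Option.getD_some]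

-- enumerate over a replicate, as a range map
theorem enum_replicate {α : Type} (c : α) :
    ∀ (k : Nat) (s : Int),
    PySem.List.enumerate (List.replicate k c) s
      = (List.range k).map (fun j => ((s + (j : Nat) : Int), c)) := by
  intro k
  induction k with
  | zero => intro s; simp [PySem.List.enumerate_nil]
  | succ k ih =>
    intro s
    rw [List.replicate_succ, PySem.List.enumerate_cons, ih (s + 1),
      List.range_succ_eq_map, List.map_cons, List.map_map]
    refine congrArg₂ List.cons (by simp) ?_
    apply List.map_congr_left
    intro j _
    simp only [Function.comp_apply, Prod.mk.injEq]
    exact ⟨by push_cast; ring, trivial⟩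

-- '\n'.join(out) + '\n' concatenates line-plus-newline blocks
theorem join_nl (s : List Char) :
    ∀ (l : List (List Char)), l ≠ [] →
    PySem.Chars.join s l ++ s = (l.map (· ++ s)).flatten := by
  intro l
  induction l with
  | nil => intro h; exact absurd rfl h
  | cons a t ih =>
    intro _
    rcases t with _ | ⟨b, t'⟩
    · rw [PySem.Chars.join_singleton]; simp
    · rw [PySem.Chars.join_cons_cons, List.map_cons, List.flatten_cons,
        List.append_assoc, List.append_assoc, ← ih (by simp)]
      simp [List.append_assoc]

theorem length_pyCenterC (f : Char) (w : Nat) (cs : List Char) :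
    (pyCenterC f w cs).length = max w cs.length := by
  unfold pyCenterC
  split_ifs with h
  · omega
  · simp only [List.length_append, List.length_replicate]
    omega

theorem getD_map_zip {α β γ : Type} (f : α → β → γ) (xs : List α) (ys : List β) (i : Nat)
    (da : α) (db : β) (dc : γ) (h1 : i < xs.length) (h2 : i < ys.length) :
    ((xs.zip ys).map (fun p => f p.1 p.2)).getD i dc = f (xs.getD i da) (ys.getD i db) := by
  rw [List.getD_eq_getElem _ _ (by simp; omega), List.getElem_map, List.getElem_zip,
    List.getD_eq_getElem _ da h1, List.getD_eq_getElem _ db h2]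

-- B reduced to the normal form
set_option maxHeartbeats 4000000 in
theorem B_eq_norm (data : List (List String)) (table_title : Option String)
    (hne : data ≠ []) :
    row_column_alt data table_title
      = String.ofList (normTable (dOf data) (ncOf data) table_title) := by
  unfold row_column_alt
  set d0 : List (List (List Char)) := data.map (fun r => r.map String.toList) with hd0
  have hd0ne : d0 ≠ [] := by
    rw [hd0]; simpa using hne
  have hh : List.headD d0 [] = d0.getD 0 [] := by cases d0 <;> rfl
  dsimp only
  rw [hh]
  set n : Nat := (d0.getD 0 []).length with hn
  have hnc : ncOf data = n := by
    unfold ncOf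
    rw [← hd0, hh]
  set D := List.map (fun r => r ++ List.replicate (n - r.length) ([] : List Char)) d0 with hD
  have hdOf : dOf data = D := by
    unfold dOf padRow
    rw [← hd0, hnc, hD]
  have hDne : D ≠ [] := by
    rw [hD]; simpa using hd0ne
  set nr : Nat := D.length with hnr
  have hnr1 : 1 ≤ nr := by
    rw [hnr]
    exact List.length_pos_of_ne_nil hDne
  set fills : List Char := ['-', ' ', '='] ++ List.replicate (nr - 1) ' ' ++ ['-'] with hfills
  have hfl : fills.length = nr + 3 := by
    rw [hfills]; simp; omega
  have hWof : ∀ c : Nat,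
      (D.map (fun r => (r.getD c []).length)).foldl max 0 = Wof D c := fun _ => rfl
  simp only [hWof]
  set col : Nat → List (List Char) := fun c =>
    [[], (D.getD 0 []).getD c [], []] ++ (D.drop 1).map (fun r => r.getD c []) ++ [[]]
    with hcol
  have hcollen : ∀ c, (col c).length = nr + 3 := by
    intro c
    rw [hcol]; simp; omega
  set strip : Nat → List (List Char) := fun c =>
    (fills.zip (col c)).map (fun p => pyCenterC p.1 (Wof D c) p.2) with hstrip
  have hget : ∀ (c i : Nat), i < nr + 3 →
      (strip c).getD i [] = pyCenterC (fills.getD i ' ') (Wof D c) ((col c).getD i []) := by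
    intro c i hi
    rw [hstrip]
    dsimp only
    exact getD_map_zip (f := fun a b => pyCenterC a (Wof D c) b) fills (col c) i ' ' [] [] (by rw [hfl]; omega) (by rw [hcollen]; omega)
  -- per-index values of fills and of a column vector
  have hcolc : ∀ c, col c
      = [] :: (D.getD 0 []).getD c [] :: [] ::
          (List.map (fun r => r.getD c []) (List.drop 1 D) ++ [[]]) := fun c => rfl
  have hfillsc : fills = '-' :: ' ' :: '=' :: (List.replicate (nr - 1) ' ' ++ ['-']) := rfl
  have hdl : (List.drop 1 D).length = nr - 1 := by simp [hnr]
  have hfill0 : fills.getD 0 ' ' = '-' := rfl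
  have hfill1 : fills.getD 1 ' ' = ' ' := rfl
  have hfill2 : fills.getD 2 ' ' = '=' := rfl
  have hfillj : ∀ j, j < nr - 1 → fills.getD (3 + j) ' ' = ' ' := by
    intro j hj
    rw [hfillsc, show 3 + j = (j + 2) + 1 from by omega]
    simp only [List.getD_cons_succ]
    rw [List.getD_append _ _ _ _ (by rw [List.length_replicate]; exact hj),
      List.getD_eq_getElem _ _ (by rw [List.length_replicate]; exact hj),
      List.getElem_replicate]
  have hfilll : fills.getD (3 + (nr - 1)) ' ' = '-' := by
    rw [hfillsc, show 3 + (nr - 1) = ((nr - 1) + 2) + 1 from by omega]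
    simp only [List.getD_cons_succ]
    rw [List.getD_append_right _ _ _ _ (by rw [List.length_replicate]),
      List.length_replicate, Nat.sub_self]
    rfl
  have hcell0 : ∀ c, (col c).getD 0 [] = [] := fun c => rfl
  have hcell1 : ∀ c, (col c).getD 1 [] = (D.getD 0 []).getD c [] := fun c => rfl
  have hcell2 : ∀ c, (col c).getD 2 [] = [] := fun c => rfl
  have hcellj : ∀ c j, j < nr - 1 →
      (col c).getD (3 + j) [] = ((List.drop 1 D).getD j []).getD c [] := by
    intro c j hj
    have hjm : j < (List.map (fun r => r.getD c []) (List.drop 1 D)).length := by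
      rw [List.length_map, hdl]; exact hj
    rw [hcolc c, show 3 + j = (j + 2) + 1 from by omega]
    simp only [List.getD_cons_succ]
    rw [List.getD_append _ _ _ _ hjm, List.getD_eq_getElem _ _ hjm]
    simp only [List.getElem_map]
    exact congrArg (fun r => List.getD r c [])
      (List.getD_eq_getElem (List.drop 1 D) [] (by rw [hdl]; exact hj)).symm
  have hcelll : ∀ c, (col c).getD (3 + (nr - 1)) [] = [] := by
    intro c
    rw [hcolc c, show 3 + (nr - 1) = ((nr - 1) + 2) + 1 from by omega]
    simp only [List.getD_cons_succ]
    rw [List.getD_append_right _ _ _ _ (by rw [List.length_map, hdl]),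
      List.length_map, hdl, Nat.sub_self]
    rfl
  -- enumerate over the fills list, decomposed
  have henum : PySem.List.enumerate fills 0
      = [((0 : Int), '-'), ((1 : Int), ' '), ((2 : Int), '=')]
          ++ (List.range (nr - 1)).map (fun j => (((3 : Int) + (j : Nat)), ' '))
          ++ [(((3 : Int) + ((nr - 1 : Nat) : Int)), '-')] := by
    rw [hfills, PySem.List.enumerate_append, PySem.List.enumerate_append, enum_replicate]
    simp only [PySem.List.enumerate_cons, PySem.List.enumerate_nil, List.length_append,
      List.length_cons, List.length_nil, List.length_replicate]
    norm_num
  set FF : Int × Char → List Char := fun p =>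
    [if p.2 == ' ' then '|' else '+'] ++
      PySem.Chars.join [p.2, if p.2 == ' ' then '|' else '+', p.2]
        ((List.map strip (List.range n)).map (fun s => s.getD p.1.toNat [])) ++
      [if p.2 == ' ' then '|' else '+']
    with hFF
  have hbdash : (('-' : Char) == ' ') = false := by decide
  have hbeq : (('=' : Char) == ' ') = false := by decide
  have hbsp : ((' ' : Char) == ' ') = true := by decide
  have hsepd : ("-+-" : String).toList = ['-', '+', '-'] := by decide
  have hsepe : ("=+=" : String).toList = ['=', '+', '='] := by decide
  have hseps : (" | " : String).toList = [' ', '|', ' '] := by decide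
  have hLdash : FF ((0 : Int), '-') = rowLine D n '-' '+' "-+-".toList (fun _ => []) := by
    rw [hFF]
    dsimp only
    simp only [hbdash, Bool.false_eq_true, if_false, List.map_map]
    unfold rowLine
    rw [hsepd]
    refine congrArg (fun z => ['+'] ++ PySem.Chars.join ['-', '+', '-'] z ++ ['+']) ?_
    apply List.map_congr_left
    intro c _
    exact (hget c 0 (by omega)).trans (by rw [hfill0, hcell0 c])
  have hLrow0 : FF ((1 : Int), ' ')
      = rowLine D n ' ' '|' " | ".toList (fun c => (D.getD 0 []).getD c []) := by
    rw [hFF]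
    dsimp only
    simp only [hbsp, if_true, List.map_map]
    unfold rowLine
    rw [hseps]
    refine congrArg (fun z => ['|'] ++ PySem.Chars.join [' ', '|', ' '] z ++ ['|']) ?_
    apply List.map_congr_left
    intro c _
    exact (hget c 1 (by omega)).trans (by rw [hfill1, hcell1 c])
  have hLeq : FF ((2 : Int), '=') = rowLine D n '=' '+' "=+=".toList (fun _ => []) := by
    rw [hFF]
    dsimp only
    simp only [hbeq, Bool.false_eq_true, if_false, List.map_map]
    unfold rowLine
    rw [hsepe]
    refine congrArg (fun z => ['+'] ++ PySem.Chars.join ['=', '+', '='] z ++ ['+']) ?_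
    apply List.map_congr_left
    intro c _
    exact (hget c 2 (by omega)).trans (by rw [hfill2, hcell2 c])
  have hLlast : FF (((3 : Int) + ((nr - 1 : Nat) : Int)), '-')
      = rowLine D n '-' '+' "-+-".toList (fun _ => []) := by
    rw [hFF]
    dsimp only
    simp only [hbdash, Bool.false_eq_true, if_false, List.map_map,
      show ((3 : Int) + ((nr - 1 : Nat) : Int)).toNat = 3 + (nr - 1) from by omega]
    unfold rowLine
    rw [hsepd]
    refine congrArg (fun z => ['+'] ++ PySem.Chars.join ['-', '+', '-'] z ++ ['+']) ?_
    apply List.map_congr_left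
    intro c _
    exact (hget c (3 + (nr - 1)) (by omega)).trans (by rw [hfilll, hcelll c])
  have hmaptail : (List.range (nr - 1)).map (fun j => FF (((3 : Int) + (j : Nat)), ' '))
      = (List.drop 1 D).map
          (fun r => rowLine D n ' ' '|' " | ".toList (fun c => r.getD c [])) := by
    refine Eq.trans (b := (List.range (nr - 1)).map
        (fun j => rowLine D n ' ' '|' " | ".toList
          (fun c => ((List.drop 1 D).getD j []).getD c []))) ?_ ?_
    · apply List.map_congr_left
      intro j hj
      have hjlt : j < nr - 1 := List.mem_range.mp hj
      rw [hFF]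
      dsimp only
      simp only [hbsp, if_true, List.map_map,
        show ((3 : Int) + (j : Nat)).toNat = 3 + j from by omega]
      unfold rowLine
      rw [hseps]
      refine congrArg (fun z => ['|'] ++ PySem.Chars.join [' ', '|', ' '] z ++ ['|']) ?_
      apply List.map_congr_left
      intro c _
      exact (hget c (3 + j) (by omega)).trans (by rw [hfillj j hjlt, hcellj c j hjlt])
    · rw [show nr - 1 = (List.drop 1 D).length from hdl.symm]
      exact map_range_getD (List.drop 1 D) []
        (fun r => rowLine D n ' ' '|' " | ".toList (fun c => r.getD c []))
  have hLINES : List.map FF (PySem.List.enumerate fills 0)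
      = rowLine D n '-' '+' "-+-".toList (fun _ => [])
          :: rowLine D n ' ' '|' " | ".toList (fun c => (D.getD 0 []).getD c [])
          :: rowLine D n '=' '+' "=+=".toList (fun _ => [])
          :: ((List.drop 1 D).map
                (fun r => rowLine D n ' ' '|' " | ".toList (fun c => r.getD c []))
              ++ [rowLine D n '-' '+' "-+-".toList (fun _ => [])]) := by
    rw [henum]
    simp only [List.map_append, List.map_cons, List.map_nil, List.map_map, Function.comp_def]
    rw [hLdash, hLrow0, hLeq, hmaptail, hLlast]
    simp
  have htitlew : (List.map (fun s => (s.getD 0 []).length) (List.map strip (List.range n))).sum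
      = ((List.range n).map (Wof D)).sum := by
    rw [List.map_map]
    refine congrArg List.sum ?_
    apply List.map_congr_left
    intro c _
    have h1 : ((strip c).getD 0 []).length = Wof D c := by
      rw [hget c 0 (by omega), hfill0, hcell0 c, length_pyCenterC]
      simp
    exact h1
  rw [hdOf, hnc]
  have hLne : List.map FF (PySem.List.enumerate fills 0) ≠ [] := by
    rw [hLINES]; simp
  rcases table_title with _ | t
  · dsimp only
    refine congrArg String.ofList ?_
    rw [join_nl ['\n'] _ hLne, hLINES]
    simp only [normTable, rowLine, List.map_cons, List.map_append, List.map_map,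
      List.flatten_cons, List.flatten_append]
    simp [List.append_assoc, Function.comp_def]
  · dsimp only
    by_cases ht : t.toList.isEmpty
    · simp only [ht, if_true]
      refine congrArg String.ofList ?_
      rw [join_nl ['\n'] _ hLne, hLINES]
      simp only [normTable, rowLine, List.map_cons, List.map_append, List.map_map,
        List.flatten_cons, List.flatten_append]
      simp [List.append_assoc, Function.comp_def]
      have h := List.isEmpty_iff.mp ht
      have h2 := congrArg String.ofList h
      simpa [String.ofList_toList] using h2
    · have ht' : t.toList.isEmpty = false := by simpa using ht
      have htne : ¬ t = "" := by
        intro h; subst h; simp_all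
      simp only [ht', Bool.false_eq_true, if_false]
      refine congrArg String.ofList ?_
      rw [htitlew,
        join_nl ['\n'] _ (by simp : (pyCenterC ' ' (((List.range n).map (Wof D)).sum + (n - 1) * 3 + 2) t.toList :: List.map FF (PySem.List.enumerate fills 0)) ≠ []),
        List.map_cons, List.flatten_cons, hLINES]
      simp only [normTable, rowLine, List.map_cons, List.map_append, List.map_map,
        List.flatten_cons, List.flatten_append]
      simp [List.append_assoc, Function.comp_def, htne]

-- ===== VERDICT (by name: the statement is the Claim_ definition above) =====
theorem row_column_spec : Claim_equal_row_column := by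
  intro data table_title hdom hpre
  unfold Spec_row_column
  rw [A_eq_norm data table_title hpre, B_eq_norm data table_title hpre.1]
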